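-- pv_equiv track=rewrite | github.com/kiipo0623/Algorithm-2021 | 0928/stockprice.py | solution
-- ===== SOURCE A (Python) =====
-- def solution(prices):
--     answer = []
--     for i in range(len(prices)):
--         count = 0
--         for j in range(i+1, len(prices)):
--             if prices[j] >= prices[i]:
--                 count = count + 1
--             else:
--                 count += 1
--                 break
--         answer.append(count)
--     return answer
-- ===== SOURCE B (Python) =====
-- def solution(prices):
--     # Monotonic stack scanned right-to-left: one pass, O(n) instead of A's O(n^2).
--     n = len(prices)
--     answer = []
--     stack = []  # (index, price) pairs; prices strictly decrease toward the bottom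
--     for i in range(n - 1, -1, -1):
--         p = prices[i]
--         while stack and stack[-1][1] >= p:
--             stack.pop()
--         answer.append(stack[-1][0] - i if stack else n - 1 - i)
--         stack.append((i, p))
--     answer.reverse()
--     return answer
-- ===== Notes on version B (the rewrite author's own statement) =====
-- stated objective: faster
-- what changed: Replaced A's per-index forward rescan (nested loops) with a single right-to-left monotonic-stack pass that finds each index's next lower price in amortized O(1).
import Mathlib
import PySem

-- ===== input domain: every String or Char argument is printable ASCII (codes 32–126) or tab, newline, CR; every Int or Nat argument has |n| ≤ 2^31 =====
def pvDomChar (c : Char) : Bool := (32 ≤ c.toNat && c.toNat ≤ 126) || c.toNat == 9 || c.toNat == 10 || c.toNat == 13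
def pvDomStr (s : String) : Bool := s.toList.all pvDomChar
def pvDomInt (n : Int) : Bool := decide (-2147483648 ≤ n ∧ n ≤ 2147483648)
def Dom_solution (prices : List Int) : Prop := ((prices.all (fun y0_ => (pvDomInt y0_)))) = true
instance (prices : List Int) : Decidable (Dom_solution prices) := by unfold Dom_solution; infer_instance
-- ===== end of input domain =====

-- B replaces A's quadratic per-index forward scan by a single right-to-left monotonic-stack pass (O(n)); return values identical.

-- ===== PORT A =====
-- inner loop of A: scan forward from i+1, count 1 per step, stop (still counting) at the first price below p
def aCount (p : Int) : List Int → Int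
  | [] => 0
  | x :: xs => if x ≥ p then 1 + aCount p xs else 1

def solution (prices : List Int) : List Int :=
  match prices with
  | [] => []
  | p :: rest => aCount p rest :: solution rest

-- ===== PORT B =====
-- pairs (index, price) starting at index k
def idxFrom (k : Int) : List Int → List (Int × Int)
  | [] => []
  | x :: xs => (k, x) :: idxFrom (k + 1) xs

-- Source B's while loop: pop stack entries with price ≥ p
def popGE (p : Int) : List (Int × Int) → List (Int × Int)
  | [] => []
  | (j, q) :: rest => if q ≥ p then popGE p rest else (j, q) :: rest

-- Source B's main loop over i = n-1 … 0; answers are consed so no final reverse is needed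
def bGo (n : Int) : List (Int × Int) → List (Int × Int) → List Int → List Int
  | [], _, acc => acc
  | (i, p) :: rest, s, acc =>
      let s' := popGE p s
      let a := match s' with
        | [] => n - 1 - i
        | (j, _) :: _ => j - i
      bGo n rest ((i, p) :: s') (a :: acc)

def solution_alt (prices : List Int) : List Int :=
  bGo (prices.length : Int) ((idxFrom 0 prices).reverse) [] []

-- ===== PRECONDITION & SPEC =====
def Spec_solution (prices : List Int) (out : List Int) : Prop := out = solution_alt prices
instance (prices : List Int) (out : List Int) : Decidable (Spec_solution prices out) := by unfold Spec_solution; infer_instance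

-- ===== CLAIM (what is proved, stated in full; the proofs are below) =====
def Claim_equal_solution : Prop := ∀ (prices : List Int), Dom_solution prices → Spec_solution prices (solution prices)

-- ===== LEMMAS AND PROOFS =====

-- stack invariant: for every probe price p the stack determines A's inner count on the suffix l,
-- whose first element sits at index b
def StackInv (b : Int) (l : List Int) (s : List (Int × Int)) : Prop :=
  ∀ p : Int, aCount p l =
    match popGE p s with
    | [] => (l.length : Int)
    | (j, _) :: _ => j - b + 1

theorem popGE_popGE (p p0 : Int) (h : p ≤ p0) (s : List (Int × Int)) :
    popGE p (popGE p0 s) = popGE p s := by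
  induction s with
  | nil => rfl
  | cons hd tl ih =>
      obtain ⟨j, q⟩ := hd
      by_cases hq : q ≥ p0
      · simp [popGE, hq, ih, le_trans h hq]
      · have hq' : q ≥ p ∨ ¬ q ≥ p := em _
        simp [popGE, hq]

theorem Inv_push (b : Int) (l : List Int) (s : List (Int × Int)) (p0 : Int)
    (h : StackInv b l s) : StackInv (b - 1) (p0 :: l) ((b - 1, p0) :: popGE p0 s) := by
  intro p
  by_cases hp : p0 ≥ p
  · have hrw := popGE_popGE p p0 hp s
    simp only [aCount, popGE, hp, if_pos, hrw, h p]
    cases popGE p s with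
    | nil => simp; ring
    | cons hd tl => obtain ⟨j, q⟩ := hd; simp; ring
  · simp [aCount, popGE, hp]

theorem idxFrom_append (k : Int) (l₁ l₂ : List Int) :
    idxFrom k (l₁ ++ l₂) = idxFrom k l₁ ++ idxFrom (k + l₁.length) l₂ := by
  induction l₁ generalizing k with
  | nil => simp [idxFrom]
  | cons x xs ih => simp [idxFrom, ih]; ring_nf

theorem bGo_main (l₁ l₂ : List Int) (s : List (Int × Int))
    (h : StackInv (l₁.length : Int) l₂ s) :
    bGo ((l₁.length : Int) + l₂.length) ((idxFrom 0 l₁).reverse) s (solution l₂)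
      = solution (l₁ ++ l₂) := by
  induction l₁ using List.reverseRecOn generalizing l₂ s with
  | nil => simp [idxFrom, bGo]
  | append_singleton ys y ih =>
      have hidx : (idxFrom 0 (ys ++ [y])).reverse
          = ((ys.length : Int), y) :: (idxFrom 0 ys).reverse := by
        simp [idxFrom_append, idxFrom]
      rw [hidx]
      simp only [bGo]
      have hb : ((ys ++ [y]).length : Int) = (ys.length : Int) + 1 := by simp
      rw [hb] at h
      have hn : (((ys ++ [y]).length : Int) + (l₂.length : Int))
          = ((ys.length : Int) + (((y :: l₂)).length : Int)) := by simp; ring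
      rw [hn]
      have ha : (match popGE y s with
          | [] => (ys.length : Int) + ((y :: l₂).length : Int) - 1 - (ys.length : Int)
          | (j, _) :: _ => j - (ys.length : Int)) = aCount y l₂ := by
        have hy := h y
        cases hs : popGE y s with
        | nil =>
            have hy2 : aCount y l₂ = (l₂.length : Int) := by rw [h y, hs]
            rw [hy2]
            simp only [List.length_cons]
            push_cast
            ring
        | cons hd tl =>
            obtain ⟨j, q⟩ := hd
            rw [hs] at hy
            simp only at hy
            rw [hy]; ring
      rw [ha]
      have hinv : StackInv ((ys.length : Int)) (y :: l₂) (((ys.length : Int), y) :: popGE y s) := by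
        have := Inv_push ((ys.length : Int) + 1) l₂ s y h
        simpa using this
      calc bGo ((ys.length : Int) + ((y :: l₂).length : Int)) ((idxFrom 0 ys).reverse)
              (((ys.length : Int), y) :: popGE y s) (aCount y l₂ :: solution l₂)
          = bGo ((ys.length : Int) + ((y :: l₂).length : Int)) ((idxFrom 0 ys).reverse)
              (((ys.length : Int), y) :: popGE y s) (solution (y :: l₂)) := rfl
        _ = solution (ys ++ y :: l₂) := ih (y :: l₂) _ hinv
        _ = solution ((ys ++ [y]) ++ l₂) := by simp

-- ===== VERDICT (by name: the statement is the Claim_ definition above) =====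
theorem solution_spec : Claim_equal_solution := by
  intro prices _
  unfold Spec_solution solution_alt
  have h0 : StackInv ((prices.length : Int)) [] [] := by
    intro p; simp [aCount, popGE]
  have := bGo_main prices [] [] h0
  simpa [solution] using this.symm
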